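-- pv_equiv track=rewrite | github.com/luoruofeng/movie_opt | movie_opt/utils.py | find_keywords_indices
-- ===== SOURCE A (Python) =====
-- def find_keywords_indices(line: str, key_words: dict) -> list[tuple[int, str, str]]:
--     """
--     在给定的行中找到包含关键词的位置及关键词本身及颜色。
--
--     :param line: 需要搜索的字符串
--     :param key_words: 关键词字典，键是关键词，值是颜色
--     :return: 包含 (起始下标, 关键词, 颜色) 的列表
--     """
--     results = []
--     for keyword, color in key_words.items():
--         start = 0
--         while (index := line.find(keyword, start)) != -1:
--             results.append((index, keyword, color))
--             start = index + len(keyword)  # 防止重复匹配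
--     return sorted(results, key=lambda x: x[0])  # 按索引排序，确保顺序绘制
-- ===== SOURCE B (Python) =====
-- def find_keywords_indices(line: str, key_words: dict) -> list[tuple[int, str, str]]:
--     # One left-to-right pass over the positions of `line`; at each position every
--     # keyword whose previous (non-overlapping) match has ended is tested in dict
--     # order.  Results come out already ordered by index (ties in dict order), so
--     # no sort is needed.
--     n = len(line)
--     nxt = {k: 0 for k in key_words}  # first position where k may match again
--     out = []
--     for i in range(n):
--         for k, color in key_words.items():
--             if nxt[k] <= i and line[i:i + len(k)] == k:
--                 out.append((i, k, color))
--                 nxt[k] = i + len(k)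
--     return out
-- ===== Notes on version B (the rewrite author's own statement) =====
-- stated objective: alternative
-- what changed: Instead of running find repeatedly per keyword and then sorting, B makes a single left-to-right pass over the line positions, testing each keyword (with a per-keyword next-allowed-start map) at each position, so the result is emitted already in sorted order and no sort is performed.
import Mathlib
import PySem

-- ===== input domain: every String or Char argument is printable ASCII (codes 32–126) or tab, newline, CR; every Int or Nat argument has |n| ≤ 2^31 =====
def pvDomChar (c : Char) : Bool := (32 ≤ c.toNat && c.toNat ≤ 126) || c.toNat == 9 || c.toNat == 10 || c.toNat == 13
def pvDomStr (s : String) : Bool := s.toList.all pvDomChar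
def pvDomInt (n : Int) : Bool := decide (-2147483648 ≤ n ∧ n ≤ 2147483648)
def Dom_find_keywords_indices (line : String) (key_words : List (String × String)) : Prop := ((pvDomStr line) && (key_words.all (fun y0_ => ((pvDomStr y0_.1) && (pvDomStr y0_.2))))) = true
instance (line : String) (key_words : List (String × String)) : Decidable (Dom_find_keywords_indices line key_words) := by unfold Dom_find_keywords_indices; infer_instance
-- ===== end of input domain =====

-- B replaces A's per-keyword `str.find` loops plus a final sort by ONE left-to-right pass over the
-- positions of `line` that emits the matches already in order (alternative algorithm, no sort).

-- ===== PORT A =====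
-- the inner `while (index := line.find(keyword, start)) != -1` loop of A; `fuel` only makes the
-- recursion structurally total (len(line)+1 iterations suffice whenever the keyword is nonempty,
-- which Pre_ guarantees; on an empty keyword Python's loop diverges)
def pyFindAll (s kw : List Char) (fuel : Nat) (start : Int) : List Int :=
  match fuel with
  | 0 => []
  | f + 1 =>
    let index := PySem.Chars.findFrom s kw start
    if index = -1 then []
    else index :: pyFindAll s kw f (index + kw.length)

def find_keywords_indices (line : String) (key_words : List (String × String)) : List (Int × String × String) :=
  let results := (PySem.Dict.ofList key_words).items.foldl
    (fun acc kc =>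
      acc ++ (pyFindAll line.toList kc.1.toList (line.toList.length + 1) 0).map
        (fun index => (index, kc.1, kc.2))) []
  PySem.List.sorted results (fun x => x.1)

-- ===== PORT B =====
-- one step of B's inner `for k, color in key_words.items()` loop (state = (nxt, out))
def altStep (L : List Char) (i : Int)
    (st : PySem.Dict String Int × List (Int × String × String)) (kc : String × String) :
    PySem.Dict String Int × List (Int × String × String) :=
  if st.1.getD kc.1 0 ≤ i ∧ PySem.Chars.slice L (some i) (some (i + PySem.Str.len kc.1)) = kc.1.toList
  then (st.1.insert kc.1 (i + PySem.Str.len kc.1), st.2 ++ [(i, kc.1, kc.2)])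
  else st

def find_keywords_indices_alt (line : String) (key_words : List (String × String)) : List (Int × String × String) :=
  let n := PySem.Str.len line
  let d := PySem.Dict.ofList key_words
  let nxt : PySem.Dict String Int := PySem.Dict.ofList (d.keys.map (fun k => (k, 0)))
  let fin := (PySem.List.pyRange 0 n).foldl (fun st i => d.items.foldl (altStep line.toList i) st) (nxt, [])
  fin.2

-- ===== PRECONDITION & SPEC =====
-- Pre_ excludes dictionaries containing an empty-string keyword: there A never returns
-- (`line.find('', start)` keeps returning `start`, so A's `while` loop runs forever).
def Pre_find_keywords_indices (line : String) (key_words : List (String × String)) : Prop :=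
  ∀ kv ∈ key_words, kv.1 ≠ ""
instance (line : String) (key_words : List (String × String)) : Decidable (Pre_find_keywords_indices line key_words) := by unfold Pre_find_keywords_indices; infer_instance

def pvWitness_find_keywords_indices : String × (List (String × String)) :=
  ("abcab c", [("ab", "red"), ("c", "blue")])

def Spec_find_keywords_indices (line : String) (key_words : List (String × String)) (out : List (Int × String × String)) : Prop := out = find_keywords_indices_alt line key_words
instance (line : String) (key_words : List (String × String)) (out : List (Int × String × String)) : Decidable (Spec_find_keywords_indices line key_words out) := by unfold Spec_find_keywords_indices; infer_instance

-- ===== CLAIM (what is proved, stated in full; the proofs are below) =====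
def Claim_equal_find_keywords_indices : Prop := ∀ (line : String) (key_words : List (String × String)), Dom_find_keywords_indices line key_words → Pre_find_keywords_indices line key_words → Spec_find_keywords_indices line key_words (find_keywords_indices line key_words)

-- ===== LEMMAS AND PROOFS =====

-- threshold carried in B's `nxt` map for keyword K before processing position i (as a Nat)
def pvThr (L K : List Char) : Nat → Nat
  | 0 => 0
  | i + 1 => if pvThr L K i ≤ i ∧ K <+: L.drop i then i + K.length else pvThr L K i

-- does B emit keyword K at position i?
def pvEmitB (L K : List Char) (i : Nat) : Bool :=
  decide (pvThr L K i ≤ i ∧ K <+: L.drop i)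

-- common intermediate between the two programs: greedy scan from position i with threshold t
def pvGScan (L K : List Char) (t i : Nat) : List Int :=
  if _h : i < L.length then
    if t ≤ i ∧ K <+: L.drop i then (i : Int) :: pvGScan L K (i + K.length) (i + 1)
    else pvGScan L K t (i + 1)
  else []
termination_by L.length - i
decreasing_by all_goals omega

-- ---- generic facts about insertBy into an index-grouped list ----

theorem pv_insertBy_pass {α : Type} (before : α → α → Bool) (x : α) (u v : List α)
    (hu : ∀ a ∈ u, before x a = false) :
    PySem.List.insertBy before x (u ++ v) = u ++ PySem.List.insertBy before x v := by
  induction u with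
  | nil => simp
  | cons y ys ih =>
    have hy := hu y (by simp)
    simp only [List.cons_append, PySem.List.insertBy, hy]
    simp [ih (fun a ha => hu a (by simp [ha]))]

theorem pv_insertBy_head {α : Type} (before : α → α → Bool) (x : α) (v : List α)
    (hv : ∀ a ∈ v, before x a = true) :
    PySem.List.insertBy before x v = x :: v := by
  cases v with
  | nil => simp [PySem.List.insertBy]
  | cons y ys => simp [PySem.List.insertBy, hv y (by simp)]

theorem pv_insert_group {T1 T2 : Type} (cnt : Nat) : ∀ (s p : Nat) (f : Nat → List (Int × T1 × T2))
    (x : Int × T1 × T2),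
    s ≤ p → p < s + cnt →
    (∀ i, ∀ a ∈ f i, a.1 = (i : Int)) → x.1 = (p : Int) →
    PySem.List.insertBy (fun a b => decide (a.1 < b.1)) x ((List.range' s cnt).flatMap f)
      = (List.range' s cnt).flatMap (fun i => if i = p then f i ++ [x] else f i) := by
  induction cnt with
  | zero => intro s p f x hs hp _ _; omega
  | succ cnt ih =>
    intro s p f x hs hp hkey hx
    rw [List.range'_succ]
    simp only [List.flatMap_cons]
    by_cases hsp : s = p
    · subst hsp
      rw [pv_insertBy_pass _ _ _ _ (by
        intro a ha
        have := hkey s a ha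
        simp [this, hx])]
      rw [pv_insertBy_head _ _ _ (by
        intro a ha
        obtain ⟨i, hi, hai⟩ := List.mem_flatMap.mp ha
        have hi' := List.mem_range'_1.mp hi
        have := hkey i a hai
        simp only [this, hx, decide_eq_true_eq]
        exact_mod_cast (by omega : s < i))]
      have : ∀ i ∈ List.range' (s+1) cnt, (if i = s then f i ++ [x] else f i) = f i := by
        intro i hi
        have hi' := List.mem_range'_1.mp hi
        simp [show i ≠ s by omega]
      rw [List.flatMap_congr this]
      simp
    · rw [pv_insertBy_pass _ _ _ _ (by
        intro a ha
        have := hkey s a ha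
        simp only [this, hx, decide_eq_false_iff_not]
        exact_mod_cast (by omega : ¬ (p < s)))]
      rw [ih (s+1) p f x (by omega) (by omega) hkey hx]
      simp [hsp]

-- ---- A-side characterisation ----

theorem pv_gScan_nil (L K : List Char) (t : Nat)
    (h : ∀ p, t ≤ p → ¬ K <+: L.drop p) : ∀ (m i : Nat), L.length - i ≤ m → pvGScan L K t i = [] := by
  intro m
  induction m with
  | zero => intro i hi; rw [pvGScan]; simp [show ¬ i < L.length by omega]
  | succ m ih =>
    intro i hi
    rw [pvGScan]
    split
    · rw [if_neg (by rintro ⟨h1, h2⟩; exact h i h1 h2)]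
      exact ih (i+1) (by omega)
    · rfl

theorem pv_gScan_advance (L K : List Char) (t p : Nat) (hp : p < L.length) :
    ∀ (m i : Nat), p - i ≤ m → i ≤ p → (∀ q, i ≤ q → q < p → ¬ (t ≤ q ∧ K <+: L.drop q)) →
    pvGScan L K t i = pvGScan L K t p := by
  intro m
  induction m with
  | zero =>
    intro i h1 h2 _
    have hip : i = p := by omega
    subst hip
    rfl
  | succ m ih =>
    intro i h1 h2 hq
    by_cases hip : i = p
    · subst hip; rfl
    · rw [pvGScan]
      rw [dif_pos (by omega)]
      rw [if_neg (hq i le_rfl (by omega))]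
      exact ih (i+1) (by omega) (by omega) (fun q hq1 hq2 => hq q (by omega) hq2)

theorem pv_findAll_eq_gScan (L K : List Char) (hK : K ≠ []) :
    ∀ (fuel t i : Nat), i ≤ t → t ≤ L.length → L.length + 1 ≤ fuel + t →
    pyFindAll L K fuel (t : Int) = pvGScan L K t i := by
  intro fuel
  induction fuel with
  | zero => intro t i _ h2 h3; omega
  | succ f ihf =>
    intro t i hit htn hfuel
    have hK1 : 1 ≤ K.length := by
      cases K with
      | nil => exact absurd rfl hK
      | cons a l => simp
    by_cases hneg : PySem.Chars.findFrom L K (t : Int) = -1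
    · have hninf := (PySem.Chars.findFrom_natCast_eq_neg_one_iff L K t htn).mp hneg
      have hno : ∀ p, t ≤ p → ¬ K <+: L.drop p := by
        intro p htp hpre
        apply hninf
        have : L.drop p = (L.drop t).drop (p - t) := by
          rw [List.drop_drop]
          congr 1
          omega
        rw [this] at hpre
        exact hpre.isInfix.trans (List.drop_suffix _ _).isInfix
      rw [pv_gScan_nil L K t hno (L.length - i) i le_rfl]
      simp [pyFindAll, hneg]
    · obtain ⟨hle, hpre, hmin⟩ := PySem.Chars.findFrom_natCast_spec L K t htn hneg
      set idx := PySem.Chars.findFrom L K (t : Int) with hidx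
      have h0 : (0:Int) ≤ idx := le_trans (by exact_mod_cast Nat.zero_le t) hle
      set p := idx.toNat with hp
      have hip : idx = (p : Int) := by omega
      have hlen : K.length ≤ (L.drop p).length := hpre.length_le
      have hpn : p < L.length := by
        simp at hlen
        omega
      have htp : t ≤ p := by omega
      have hplen : p + K.length ≤ L.length := by
        simp at hlen
        omega
      rw [show pyFindAll L K (f+1) (t : Int) = idx :: pyFindAll L K f (idx + K.length) by
        simp only [pyFindAll]
        rw [if_neg hneg]]
      rw [pv_gScan_advance L K t p hpn (p - i) i le_rfl (by omega) (by
        intro q h1 h2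
        rintro ⟨hq1, hq2⟩
        exact hmin q hq1 h2 hq2)]
      rw [pvGScan]
      rw [dif_pos hpn, if_pos ⟨htp, hpre⟩]
      have this2 : ((p:Int) + (K.length:Int)) = ((p + K.length : Nat) : Int) := by
        push_cast
        ring
      rw [hip]
      rw [this2]
      congr 1
      exact ihf (p + K.length) (p + 1) (by omega) hplen (by omega)

theorem pv_gScan_filter (L K : List Char) :
    ∀ (m j : Nat), L.length - j ≤ m → pvGScan L K (pvThr L K j) j
      = ((List.range' j (L.length - j)).filter (fun i => pvEmitB L K i)).map (fun (i : Nat) => (i : Int)) := by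
  intro m
  induction m with
  | zero =>
    intro j hj
    rw [pvGScan]
    rw [dif_neg (by omega)]
    rw [show L.length - j = 0 by omega]
    simp
  | succ m ih =>
    intro j hj
    by_cases hjn : j < L.length
    · rw [show L.length - j = (L.length - (j+1)) + 1 by omega, List.range'_succ]
      rw [pvGScan, dif_pos hjn]
      by_cases hc : pvThr L K j ≤ j ∧ K <+: L.drop j
      · rw [if_pos hc]
        have hemit : pvEmitB L K j = true := by simp [pvEmitB, hc.1, hc.2]
        have hthr : pvThr L K (j+1) = j + K.length := by simp [pvThr, hc]
        rw [List.filter_cons_of_pos hemit]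
        simp only [List.map_cons]
        congr 1
        rw [← hthr]
        exact ih (j+1) (by omega)
      · rw [if_neg hc]
        have hemit : ¬ pvEmitB L K j = true := by simp only [pvEmitB, decide_eq_true_eq]; exact hc
        have hthr : pvThr L K (j+1) = pvThr L K j := by simp [pvThr, hc]
        rw [List.filter_cons_of_neg (by simpa using hemit)]
        rw [← hthr]
        exact ih (j+1) (by omega)
    · rw [pvGScan, dif_neg hjn]
      rw [show L.length - j = 0 by omega]
      simp

-- ---- sort side: stable sort of the concatenated blocks is the position-major list ----

theorem pv_fold_block (L : List Char) (K : List Char) (k : String) (c : String) :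
    ∀ (m j : Nat), L.length - j ≤ m → ∀ (base : Nat → List (Int × String × String)),
    (∀ i, ∀ a ∈ base i, a.1 = (i : Int)) →
    ((((List.range' j (L.length - j)).filter (fun i => pvEmitB L K i)).map
        (fun (i : Nat) => ((i : Int), k, c))).foldl
      (fun acc x => PySem.List.insertBy (fun a b => decide (a.1 < b.1)) x acc)
      ((List.range L.length).flatMap base))
    = (List.range L.length).flatMap
        (fun i => base i ++ if j ≤ i ∧ pvEmitB L K i = true then [((i : Int), k, c)] else []) := by
  intro m
  induction m with
  | zero =>
    intro j hj base hbase
    rw [show L.length - j = 0 by omega]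
    simp only [List.range'_zero, List.filter_nil, List.map_nil, List.foldl_nil]
    apply List.flatMap_congr
    intro i hi
    have : i < L.length := List.mem_range.mp hi
    rw [if_neg (by omega), List.append_nil]
  | succ m ih =>
    intro j hj base hbase
    by_cases hjn : j < L.length
    · rw [show L.length - j = (L.length - (j+1)) + 1 by omega, List.range'_succ]
      by_cases he : pvEmitB L K j = true
      · rw [List.filter_cons_of_pos he, List.map_cons, List.foldl_cons]
        rw [show (List.range L.length) = List.range' 0 L.length from List.range_eq_range']
        rw [pv_insert_group L.length 0 j base ((j:Int),k,c) (by omega) (by omega) hbase rfl]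
        rw [← List.range_eq_range']
        rw [ih (j+1) (by omega) _ (by
          intro i a ha
          by_cases hij : i = j
          · rw [if_pos hij] at ha
            rcases List.mem_append.mp ha with h | h
            · exact hbase i a h
            · simp at h
              rw [h, hij]
          · rw [if_neg hij] at ha
            exact hbase i a ha)]
        apply List.flatMap_congr
        intro i hi
        by_cases hij : i = j
        · subst hij
          rw [if_pos rfl, if_neg (by omega), if_pos ⟨le_rfl, he⟩]
          simp
        · rw [if_neg hij]
          congr 1
          have hiff : (j + 1 ≤ i ∧ pvEmitB L K i = true) ↔ (j ≤ i ∧ pvEmitB L K i = true) :=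
            and_congr_left' (by omega)
          rw [if_congr hiff rfl rfl]
      · rw [List.filter_cons_of_neg (by simpa using he)]
        rw [ih (j+1) (by omega) base hbase]
        apply List.flatMap_congr
        intro i hi
        congr 1
        by_cases hij : i = j
        · subst hij
          rw [if_neg (by omega), if_neg (by rintro ⟨_, h2⟩; exact he h2)]
        · have hiff : (j + 1 ≤ i ∧ pvEmitB L K i = true) ↔ (j ≤ i ∧ pvEmitB L K i = true) :=
            and_congr_left' (by omega)
          rw [if_congr hiff rfl rfl]
    · rw [show L.length - j = 0 by omega]
      simp only [List.range'_zero, List.filter_nil, List.map_nil, List.foldl_nil]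
      apply List.flatMap_congr
      intro i hi
      have : i < L.length := List.mem_range.mp hi
      rw [if_neg (by omega), List.append_nil]

theorem pv_group_key (L : List Char) (its : List (String × String)) (i : Nat) :
    ∀ a ∈ its.filterMap (fun kc =>
        if pvEmitB L kc.1.toList i = true then some ((i : Int), kc.1, kc.2) else none),
      a.1 = (i : Int) := by
  intro a ha
  obtain ⟨kc, _, hf⟩ := List.mem_filterMap.mp ha
  by_cases h : pvEmitB L kc.1.toList i = true
  · rw [if_pos h] at hf
    cases hf
    rfl
  · rw [if_neg h] at hf
    cases hf

theorem pv_sorted_eq (L : List Char) (its : List (String × String)) :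
    PySem.List.sorted
      (its.flatMap (fun kc =>
        (((List.range L.length).filter (fun i => pvEmitB L kc.1.toList i)).map
          (fun (i : Nat) => ((i : Int), kc.1, kc.2)))))
      (fun x => x.1)
    = (List.range L.length).flatMap (fun i =>
        its.filterMap (fun kc =>
          if pvEmitB L kc.1.toList i = true then some ((i : Int), kc.1, kc.2) else none)) := by
  induction its using List.reverseRecOn with
  | nil => simp [PySem.List.sorted_eq_foldl_insertBy]
  | append_singleton its kc ih =>
    rw [List.flatMap_append, PySem.List.sorted_eq_foldl_insertBy, List.foldl_append]
    rw [← PySem.List.sorted_eq_foldl_insertBy]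
    rw [ih]
    simp only [List.flatMap_cons, List.flatMap_nil, List.append_nil]
    have := pv_fold_block L kc.1.toList kc.1 kc.2 (L.length) 0 (by omega)
      (fun i => its.filterMap (fun kc' =>
        if pvEmitB L kc'.1.toList i = true then some ((i : Int), kc'.1, kc'.2) else none))
      (fun i => pv_group_key L its i)
    rw [Nat.sub_zero, ← List.range_eq_range'] at this
    rw [this]
    apply List.flatMap_congr
    intro i _
    rw [List.filterMap_append]
    congr 1
    simp only [List.filterMap_cons, List.filterMap_nil]
    by_cases h : pvEmitB L kc.1.toList i = true
    · rw [if_pos h, if_pos ⟨Nat.zero_le i, h⟩]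
    · rw [if_neg h, if_neg (by rintro ⟨_, h2⟩; exact h h2)]

-- ---- B-side characterisation ----

theorem pv_slice_eq_iff (L K : List Char) (j : Nat) :
    (PySem.Chars.slice L (some (j : Int)) (some ((j : Int) + (K.length : Int))) = K) ↔ K <+: L.drop j := by
  have hcast : ((j : Int) + (K.length : Int)) = (((j + K.length : Nat)) : Int) := by push_cast; ring
  rw [hcast]
  show PySem.List.slice L (some (j : Int)) (some (((j + K.length : Nat)) : Int)) = K ↔ _
  rw [PySem.List.slice_natCast]
  rw [show j + K.length - j = K.length by omega]
  constructor
  · intro h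
    rw [List.prefix_iff_eq_take]
    exact h.symm
  · intro h
    rw [List.prefix_iff_eq_take] at h
    exact h.symm

theorem pv_inner (L : List Char) (j : Nat) :
    ∀ (its : List (String × String)) (d : PySem.Dict String Int)
      (acc : List (Int × String × String)),
    (its.map Prod.fst).Nodup →
    (its.foldl (altStep L ((j : Nat) : Int)) (d, acc)).2
      = acc ++ its.filterMap (fun kc =>
          if d.getD kc.1 0 ≤ (j : Int) ∧ kc.1.toList <+: L.drop j
          then some ((j : Int), kc.1, kc.2) else none)
    ∧ ∀ k : String,
        (its.foldl (altStep L ((j : Nat) : Int)) (d, acc)).1.getD k 0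
          = if k ∈ its.map Prod.fst ∧ d.getD k 0 ≤ (j : Int) ∧ k.toList <+: L.drop j
            then (j : Int) + k.toList.length else d.getD k 0 := by
  intro its
  induction its with
  | nil =>
    intro d acc _
    constructor
    · simp
    · intro k
      rw [if_neg (by simp)]
      rfl
  | cons kc its ih =>
    intro d acc hnd
    have hnd1 : kc.1 ∉ its.map Prod.fst := by
      simp only [List.map_cons, List.nodup_cons] at hnd
      exact hnd.1
    have hnd2 : (its.map Prod.fst).Nodup := by
      simp only [List.map_cons, List.nodup_cons] at hnd
      exact hnd.2
    simp only [List.foldl_cons]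
    have hstep : altStep L ((j : Nat) : Int) (d, acc) kc
        = if d.getD kc.1 0 ≤ (j : Int) ∧ kc.1.toList <+: L.drop j
          then (d.insert kc.1 ((j : Int) + kc.1.toList.length), acc ++ [((j : Int), kc.1, kc.2)])
          else (d, acc) := by
      rw [altStep]
      by_cases hC : d.getD kc.1 0 ≤ (j : Int) ∧ kc.1.toList <+: L.drop j
      · rw [if_pos hC, if_pos (by
          refine ⟨hC.1, ?_⟩
          rw [PySem.Str.len_eq]
          exact (pv_slice_eq_iff L kc.1.toList j).mpr hC.2)]
        rw [PySem.Str.len_eq]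
      · rw [if_neg hC, if_neg (by
          rintro ⟨h1, h2⟩
          rw [PySem.Str.len_eq] at h2
          exact hC ⟨h1, (pv_slice_eq_iff L kc.1.toList j).mp h2⟩)]
    by_cases hC : d.getD kc.1 0 ≤ (j : Int) ∧ kc.1.toList <+: L.drop j
    · rw [hstep, if_pos hC]
      obtain ⟨ih2, ih1⟩ := ih (d.insert kc.1 ((j : Int) + kc.1.toList.length)) (acc ++ [((j : Int), kc.1, kc.2)]) hnd2
      constructor
      · rw [ih2]
        rw [List.filterMap_cons_some (by rw [if_pos hC])]
        rw [List.append_assoc, List.singleton_append]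
        congr 2
        apply List.filterMap_congr
        intro kc' hkc'
        have hne : kc'.1 ≠ kc.1 := by
          intro heq
          exact hnd1 (heq ▸ (List.mem_map.mpr ⟨kc', hkc', rfl⟩))
        rw [PySem.Dict.getD_insert_of_ne _ _ _ hne]
      · intro k
        rw [ih1 k]
        by_cases hk : k = kc.1
        · subst hk
          rw [PySem.Dict.getD_insert_self]
          rw [if_neg (by rintro ⟨h1, _⟩; exact hnd1 h1)]
          rw [if_pos ⟨by simp, hC⟩]
        · rw [PySem.Dict.getD_insert_of_ne _ _ _ hk]
          by_cases hmem : k ∈ its.map Prod.fst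
          · rw [List.map_cons]
            by_cases hrest : d.getD k 0 ≤ (j : Int) ∧ k.toList <+: L.drop j
            · rw [if_pos ⟨hmem, hrest⟩, if_pos ⟨List.mem_cons_of_mem _ hmem, hrest⟩]
            · rw [if_neg (by rintro ⟨_, h⟩; exact hrest h), if_neg (by rintro ⟨_, h⟩; exact hrest h)]
          · rw [if_neg (by rintro ⟨h1, _⟩; exact hmem h1)]
            rw [if_neg (by
              rintro ⟨h1, h2⟩
              rw [List.map_cons] at h1
              rcases List.mem_cons.mp h1 with h | h
              · exact hk h
              · exact hmem h)]
    · rw [hstep, if_neg hC]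
      obtain ⟨ih2, ih1⟩ := ih d acc hnd2
      constructor
      · rw [ih2, List.filterMap_cons_none (by rw [if_neg hC])]
      · intro k
        rw [ih1 k]
        by_cases hk : k = kc.1
        · subst hk
          rw [if_neg (by rintro ⟨h1, _⟩; exact hnd1 h1)]
          rw [if_neg (by rintro ⟨_, h2⟩; exact hC h2)]
        · by_cases hmem : k ∈ its.map Prod.fst
          · by_cases hrest : d.getD k 0 ≤ (j : Int) ∧ k.toList <+: L.drop j
            · rw [if_pos ⟨hmem, hrest⟩, if_pos ⟨by simp [hmem], hrest⟩]
            · rw [if_neg (by rintro ⟨_, h⟩; exact hrest h), if_neg (by rintro ⟨_, h⟩; exact hrest h)]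
          · rw [if_neg (by rintro ⟨h1, _⟩; exact hmem h1)]
            rw [if_neg (by
              rintro ⟨h1, h2⟩
              rw [List.map_cons] at h1
              rcases List.mem_cons.mp h1 with h | h
              · exact hk h
              · exact hmem h)]

theorem pv_outer (L : List Char) (its : List (String × String))
    (hnd : (its.map Prod.fst).Nodup) :
    ∀ (cnt j : Nat) (d : PySem.Dict String Int) (acc : List (Int × String × String)),
    (∀ kc ∈ its, d.getD kc.1 0 = ((pvThr L kc.1.toList j : Nat) : Int)) →
    (((List.range' j cnt).map (fun (i : Nat) => (i : Int))).foldl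
        (fun st i => its.foldl (altStep L i) st) (d, acc)).2
      = acc ++ (List.range' j cnt).flatMap (fun i =>
          its.filterMap (fun kc =>
            if pvEmitB L kc.1.toList i = true then some ((i : Int), kc.1, kc.2) else none)) := by
  intro cnt
  induction cnt with
  | zero => intro j d acc _; simp
  | succ cnt ih =>
    intro j d acc hinv
    rw [List.range'_succ, List.map_cons, List.foldl_cons, List.flatMap_cons]
    obtain ⟨h2, h1⟩ := pv_inner L j its d acc hnd
    have hgrp : its.filterMap (fun kc =>
        if d.getD kc.1 0 ≤ (j : Int) ∧ kc.1.toList <+: L.drop j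
        then some ((j : Int), kc.1, kc.2) else none)
      = its.filterMap (fun kc =>
          if pvEmitB L kc.1.toList j = true then some ((j : Int), kc.1, kc.2) else none) := by
      apply List.filterMap_congr
      intro kc hkc
      have hd := hinv kc hkc
      by_cases hE : pvEmitB L kc.1.toList j = true
      · have hE' := of_decide_eq_true hE
        rw [if_pos hE, if_pos ⟨by rw [hd]; exact_mod_cast hE'.1, hE'.2⟩]
      · rw [if_neg hE, if_neg (by
          rintro ⟨ha, hb⟩
          apply hE
          rw [hd] at ha
          exact decide_eq_true ⟨by exact_mod_cast ha, hb⟩)]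
    have hst : its.foldl (altStep L ((j : Nat) : Int)) (d, acc)
        = ((its.foldl (altStep L ((j : Nat) : Int)) (d, acc)).1,
           (its.foldl (altStep L ((j : Nat) : Int)) (d, acc)).2) := rfl
    rw [hst, ih (j+1) _ _ (by
      intro kc hkc
      rw [h1 kc.1]
      have hd := hinv kc hkc
      have hmem : kc.1 ∈ its.map Prod.fst := List.mem_map.mpr ⟨kc, hkc, rfl⟩
      by_cases hC : pvThr L kc.1.toList j ≤ j ∧ kc.1.toList <+: L.drop j
      · rw [if_pos ⟨hmem, by rw [hd]; exact_mod_cast hC.1, hC.2⟩]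
        rw [show pvThr L kc.1.toList (j+1) = j + kc.1.toList.length by simp [pvThr, hC]]
        push_cast
        ring
      · rw [if_neg (by
          rintro ⟨_, ha, hb⟩
          rw [hd] at ha
          exact hC ⟨by exact_mod_cast ha, hb⟩)]
        rw [hd]
        congr 1
        simp [pvThr, hC])]
    rw [h2, hgrp]
    simp [List.append_assoc]

-- ---- glue facts ----

theorem pv_mem_update_items (ps : List (String × String)) :
    ∀ (d : PySem.Dict String String) (kc : String × String),
    kc ∈ (List.foldl (fun acc (p : String × String) => acc.insert p.1 p.2) d ps).items →
    kc.1 ∈ ps.map Prod.fst ∨ kc ∈ d.items := by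
  induction ps with
  | nil => intro d kc h; exact Or.inr h
  | cons p ps ih =>
    intro d kc h
    rcases ih (d.insert p.1 p.2) kc h with h1 | h1
    · exact Or.inl (by simp at h1 ⊢; tauto)
    · rcases (PySem.Dict.mem_items_insert d p.1 p.2 kc).mp h1 with h2 | h2
      · left; simp [h2]
      · exact Or.inr h2.1

theorem pv_mem_ofList_items (ps : List (String × String)) (kc : String × String)
    (h : kc ∈ (PySem.Dict.ofList ps).items) : kc.1 ∈ ps.map Prod.fst := by
  have := pv_mem_update_items ps PySem.Dict.empty kc (by
    simpa [PySem.Dict.ofList, PySem.Dict.update] using h)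
  rcases this with h1 | h1
  · exact h1
  · simp [PySem.Dict.empty] at h1

theorem pv_nxt0_getD_aux (ps : List String) :
    ∀ (d : PySem.Dict String Int), (∀ k', d.getD k' 0 = 0) →
    ∀ k, (List.foldl (fun acc (p : String × Int) => acc.insert p.1 p.2) d (ps.map (fun k => (k, (0 : Int))))).getD k 0 = 0 := by
  induction ps with
  | nil => intro d h k; exact h k
  | cons p ps ih =>
    intro d h k
    rw [List.map_cons, List.foldl_cons]
    exact ih (d.insert p 0) (by
      intro k'
      rw [PySem.Dict.getD_insert]
      split <;> simp [h]) k

theorem pv_nxt0_getD (ps : List String) (k : String) :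
    (PySem.Dict.ofList (ps.map (fun k => (k, (0 : Int))))).getD k 0 = 0 := by
  have := pv_nxt0_getD_aux ps PySem.Dict.empty (by intro k'; simp) k
  simpa [PySem.Dict.ofList, PySem.Dict.update] using this

theorem pv_main (line : String) (key_words : List (String × String))
    (hpre : ∀ kv ∈ key_words, kv.1 ≠ "") :
    find_keywords_indices line key_words = find_keywords_indices_alt line key_words := by
  set L := line.toList with hL
  set its := (PySem.Dict.ofList key_words).items with hits
  have hnd : (its.map Prod.fst).Nodup := by
    have := PySem.Dict.nodup_keys_ofList (κ := String) (ν := String) key_words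
    simpa [PySem.Dict.keys, Function.comp] using this
  have hne : ∀ kc ∈ its, kc.1.toList ≠ [] := by
    intro kc hkc hnil
    obtain ⟨kv, hkv, hfst⟩ := List.mem_map.mp (pv_mem_ofList_items key_words kc hkc)
    apply hpre kv hkv
    rw [hfst]
    exact String.toList_eq_nil_iff.mp hnil
  -- A side
  have hA : find_keywords_indices line key_words
      = (List.range L.length).flatMap (fun i =>
          its.filterMap (fun kc =>
            if pvEmitB L kc.1.toList i = true then some ((i : Int), kc.1, kc.2) else none)) := by
    rw [find_keywords_indices]
    rw [PySem.List.foldl_append_eq_flatMap]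
    rw [List.nil_append]
    rw [← pv_sorted_eq L its]
    congr 1
    apply List.flatMap_congr
    intro kc hkc
    have h1 : pyFindAll L kc.1.toList (L.length + 1) ((0 : Nat) : Int)
        = pvGScan L kc.1.toList 0 0 :=
      pv_findAll_eq_gScan L kc.1.toList (hne kc hkc) (L.length + 1) 0 0 le_rfl (Nat.zero_le _) (by omega)
    have h2 : pvGScan L kc.1.toList (pvThr L kc.1.toList 0) 0
        = ((List.range' 0 (L.length - 0)).filter (fun i => pvEmitB L kc.1.toList i)).map
            (fun (i : Nat) => (i : Int)) :=
      pv_gScan_filter L kc.1.toList L.length 0 (by omega)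
    rw [Nat.sub_zero, ← List.range_eq_range'] at h2
    rw [show ((0 : Nat) : Int) = (0 : Int) by norm_num] at h1
    have h3 := h1.trans h2
    rw [h3, List.map_map]
    rfl
  -- B side
  have hB : find_keywords_indices_alt line key_words
      = (List.range L.length).flatMap (fun i =>
          its.filterMap (fun kc =>
            if pvEmitB L kc.1.toList i = true then some ((i : Int), kc.1, kc.2) else none)) := by
    rw [find_keywords_indices_alt]
    simp only [PySem.Str.len_eq]
    rw [← hL]
    rw [PySem.List.pyRange_zero_natCast]
    have := pv_outer L its hnd (L.length) 0
      (PySem.Dict.ofList ((PySem.Dict.ofList key_words).keys.map (fun k => (k, (0 : Int))))) []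
      (by
        intro kc _
        rw [pv_nxt0_getD]
        simp [pvThr])
    rw [← List.range_eq_range'] at this
    simpa using this
  rw [hA, hB]

-- ===== VERDICT (by name: the statement is the Claim_ definition above) =====
theorem find_keywords_indices_spec : Claim_equal_find_keywords_indices := by
  intro line key_words _ hpre
  unfold Spec_find_keywords_indices
  exact pv_main line key_words hpre
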